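-- pv_equiv track=rewrite | github.com/JonathanBechtel/draft-app | alembic/versions/1f05df1c92b9_fix_multi_positions.py | derive_position_tags
-- ===== SOURCE A (Python) =====
-- from typing import List, Optional, Dict
--
-- _BASE_NORMALIZATION = {
--     "PG": "PG",
--     "POINT": "PG",
--     "POINTGUARD": "PG",
--     "SG": "SG",
--     "SHOOTING": "SG",
--     "SHOOTINGGUARD": "SG",
--     "SF": "SF",
--     "SMALL": "SF",
--     "SMALLFORWARD": "SF",
--     "PF": "PF",
--     "POWER": "PF",
--     "POWERFORWARD": "PF",
--     "C": "C",
--     "CENTER": "C",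
--     "G": "G",
--     "GUARD": "G",
--     "F": "F",
--     "FORWARD": "F",
-- }
--
-- _BASE_ORDER = ["PG", "SG", "SF", "PF", "C", "G", "F"]
--
-- def _tokenize_raw_position(raw: str) -> List[str]:
--     # Normalize delimiters: " and " -> "-", "/" -> "-"
--     s = raw.replace(" and ", "-").replace("/", "-")
--     # Remove remaining spaces and uppercase
--     cleaned = s.replace(" ", "").upper()
--     tokens = [tok for tok in cleaned.split("-") if tok]
--     normalized: List[str] = []
--     for token in tokens:
--         norm = _BASE_NORMALIZATION.get(token)
--         if norm:
--             normalized.append(norm)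
--     return normalized
--
-- def derive_position_tags(raw: Optional[str]) -> Optional[str]:
--     if raw is None:
--         return None
--     raw = raw.strip()
--     if not raw:
--         return None
--     tokens = _tokenize_raw_position(raw)
--     if not tokens:
--         return None
--
--     # Sort based on base order
--     order_index = {code: i for i, code in enumerate(_BASE_ORDER)}
--     unique = sorted(list(set(tokens)), key=lambda code: order_index.get(code, 99))
--     fine_token = "_".join(token.lower() for token in unique)
--     return fine_token
-- ===== SOURCE B (Python) =====
-- from typing import List, Optional
--
-- _BASE_NORMALIZATION = {
--     "PG": "PG", "POINT": "PG", "POINTGUARD": "PG",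
--     "SG": "SG", "SHOOTING": "SG", "SHOOTINGGUARD": "SG",
--     "SF": "SF", "SMALL": "SF", "SMALLFORWARD": "SF",
--     "PF": "PF", "POWER": "PF", "POWERFORWARD": "PF",
--     "C": "C", "CENTER": "C",
--     "G": "G", "GUARD": "G",
--     "F": "F", "FORWARD": "F",
-- }
--
-- # canonical code paired with its final lowercase tag, in priority order
-- _CODE_TAGS = [("PG", "pg"), ("SG", "sg"), ("SF", "sf"), ("PF", "pf"),
--               ("C", "c"), ("G", "g"), ("F", "f")]
--
-- def derive_position_tags(raw: Optional[str]) -> Optional[str]: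
--     if raw is None:
--         return None
--     s = raw.strip()
--     if not s:
--         return None
--     cleaned = s.replace(" and ", "-").replace("/", "-").replace(" ", "").upper()
--     toks = cleaned.split("-")
--     # transpose the loops: for each canonical code (already in priority order)
--     # ask whether any raw token normalizes to it -- no token list, no set,
--     # no sort, no order_index dict
--     tags = [name for code, name in _CODE_TAGS
--             if any(_BASE_NORMALIZATION.get(t) == code for t in toks)]
--     return "_".join(tags) if tags else None
-- ===== Notes on version B (the rewrite author's own statement) =====
-- stated objective: simpler
-- what changed: B transposes the loops: instead of building the normalized token list, deduplicating it through a set and sorting by an order_index dict, it scans the fixed 7-entry canonical order once and keeps each code for which any raw token normalizes to it, joining precomputed lowercase tags.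
import Mathlib
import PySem

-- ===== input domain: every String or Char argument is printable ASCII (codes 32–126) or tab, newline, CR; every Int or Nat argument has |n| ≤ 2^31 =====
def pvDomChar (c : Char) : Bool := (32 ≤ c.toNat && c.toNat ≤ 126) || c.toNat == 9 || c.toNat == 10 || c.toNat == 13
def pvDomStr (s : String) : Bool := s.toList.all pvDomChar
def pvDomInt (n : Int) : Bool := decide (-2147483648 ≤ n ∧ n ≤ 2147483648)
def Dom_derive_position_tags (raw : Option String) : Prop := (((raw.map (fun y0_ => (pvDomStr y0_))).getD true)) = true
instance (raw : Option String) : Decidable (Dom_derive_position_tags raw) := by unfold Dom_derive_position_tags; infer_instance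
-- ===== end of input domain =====

-- B transposes the loops: it scans the fixed canonical order once, keeping each code
-- some raw token normalizes to (no token list, no set, no sort, no order_index dict).

-- ===== PORT A =====
-- shared module-level context: _BASE_NORMALIZATION, _BASE_ORDER, _tokenize_raw_position
def pvBaseNormalization : PySem.Dict String String := PySem.Dict.ofList
  [("PG", "PG"), ("POINT", "PG"), ("POINTGUARD", "PG"),
   ("SG", "SG"), ("SHOOTING", "SG"), ("SHOOTINGGUARD", "SG"),
   ("SF", "SF"), ("SMALL", "SF"), ("SMALLFORWARD", "SF"),
   ("PF", "PF"), ("POWER", "PF"), ("POWERFORWARD", "PF"),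
   ("C", "C"), ("CENTER", "C"),
   ("G", "G"), ("GUARD", "G"),
   ("F", "F"), ("FORWARD", "F")]

def pvBaseOrder : List String := ["PG", "SG", "SF", "PF", "C", "G", "F"]

def pvTokenizeRawPosition (raw : String) : List String :=
  let s := PySem.Str.replace (PySem.Str.replace raw " and " "-") "/" "-"
  let cleaned := PySem.Str.upper (PySem.Str.replace s " " "")
  let tokens := ((PySem.Str.split? cleaned "-").getD []).filter (fun tok => tok != "")
  tokens.foldl (fun normalized token =>
    match pvBaseNormalization.get? token with
    | some norm => if norm != "" then normalized ++ [norm] else normalized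
    | none => normalized) []

def derive_position_tags (raw : Option String) : Option String :=
  match raw with
  | none => none
  | some raw0 =>
    let raw1 := PySem.Str.strip raw0
    if raw1 == "" then none
    else
      let tokens := pvTokenizeRawPosition raw1
      if tokens == [] then none
      else
        let orderIndex : PySem.Dict String Int :=
          (PySem.List.enumerate pvBaseOrder).foldl
            (fun d p => d.insert p.2 p.1) PySem.Dict.empty
        let unique := PySem.List.sorted (PySem.Set.ofList tokens)
          (fun code => orderIndex.getD code 99)
        some (PySem.Str.join "_" (unique.map PySem.Str.lower))

-- ===== PORT B =====
-- canonical code paired with its final lowercase tag, in priority order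
def pvCodeTags : List (String × String) :=
  [("PG", "pg"), ("SG", "sg"), ("SF", "sf"), ("PF", "pf"),
   ("C", "c"), ("G", "g"), ("F", "f")]

def derive_position_tags_alt (raw : Option String) : Option String :=
  match raw with
  | none => none
  | some raw0 =>
    let s := PySem.Str.strip raw0
    if s == "" then none
    else
      let cleaned := PySem.Str.upper (PySem.Str.replace
        (PySem.Str.replace (PySem.Str.replace s " and " "-") "/" "-") " " "")
      let toks := (PySem.Str.split? cleaned "-").getD []
      let tags := (pvCodeTags.filter (fun ct =>
        toks.any (fun t => pvBaseNormalization.get? t == some ct.1))).map (fun ct => ct.2)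
      if tags == [] then none else some (PySem.Str.join "_" tags)

-- ===== PRECONDITION & SPEC =====
def Spec_derive_position_tags (raw : Option String) (out : Option String) : Prop := out = derive_position_tags_alt raw
instance (raw : Option String) (out : Option String) : Decidable (Spec_derive_position_tags raw out) := by unfold Spec_derive_position_tags; infer_instance

-- ===== CLAIM =====
def Claim_equal_derive_position_tags : Prop := ∀ (raw : Option String), Dom_derive_position_tags raw → Spec_derive_position_tags raw (derive_position_tags raw)

-- ===== LEMMAS AND PROOFS =====

def pvStep : List String → String → List String := fun normalized token =>
  match pvBaseNormalization.get? token with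
  | some norm => if norm != "" then normalized ++ [norm] else normalized
  | none => normalized

-- every value the normalization dict can return is a nonempty canonical code
lemma norm_value_mem (tok v : String)
    (h : pvBaseNormalization.get? tok = some v) : v ∈ pvBaseOrder ∧ v ≠ "" := by
  have hitems := PySem.Dict.mem_items_of_get?_eq_some _ h
  have hv : v ∈ pvBaseNormalization.values := by
    simp only [PySem.Dict.values]
    exact List.mem_map_of_mem hitems
  exact (by decide : ∀ w ∈ pvBaseNormalization.values, w ∈ pvBaseOrder ∧ w ≠ "") v hv

-- membership in A's normalized fold ↔ some token normalizes to the code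
lemma mem_normfold (toks : List String) (acc : List String) (c : String) :
    c ∈ toks.foldl pvStep acc ↔
      c ∈ acc ∨ ∃ t ∈ toks, pvBaseNormalization.get? t = some c := by
  induction toks generalizing acc with
  | nil => simp
  | cons tok rest ih =>
    rw [List.foldl_cons]
    rcases hg : pvBaseNormalization.get? tok with _ | v
    · have hstep : pvStep acc tok = acc := by simp [pvStep, hg]
      rw [hstep, ih]
      constructor
      · rintro (h | ⟨t, ht, hgt⟩)
        · exact Or.inl h
        · exact Or.inr ⟨t, List.mem_cons_of_mem _ ht, hgt⟩
      · rintro (h | ⟨t, ht, hgt⟩)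
        · exact Or.inl h
        · rcases List.mem_cons.mp ht with rfl | ht'
          · rw [hg] at hgt; cases hgt
          · exact Or.inr ⟨t, ht', hgt⟩
    · have hvne : v ≠ "" := (norm_value_mem tok v hg).2
      have hstep : pvStep acc tok = acc ++ [v] := by simp [pvStep, hg, hvne]
      rw [hstep, ih]
      constructor
      · rintro (h | ⟨t, ht, hgt⟩)
        · rcases List.mem_append.mp h with h' | h'
          · exact Or.inl h'
          · exact Or.inr ⟨tok, by simp, by rw [hg, List.mem_singleton.mp h']⟩
        · exact Or.inr ⟨t, List.mem_cons_of_mem _ ht, hgt⟩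
      · rintro (h | ⟨t, ht, hgt⟩)
        · exact Or.inl (List.mem_append.mpr (Or.inl h))
        · rcases List.mem_cons.mp ht with rfl | ht'
          · rw [hg] at hgt
            exact Or.inl (List.mem_append.mpr (Or.inr
              (by simp [(Option.some_inj.mp hgt).symm])))
          · exact Or.inr ⟨t, ht', hgt⟩

-- the "" tokens A filters out never normalize, so the filter is invisible to ∃
lemma mem_tokenize_iff (raw1 : String) (c : String) :
    c ∈ pvTokenizeRawPosition raw1 ↔
      ∃ t ∈ ((PySem.Str.split? (PySem.Str.upper (PySem.Str.replace
        (PySem.Str.replace (PySem.Str.replace raw1 " and " "-") "/" "-") " " "")) "-").getD []),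
        pvBaseNormalization.get? t = some c := by
  have hdef : pvTokenizeRawPosition raw1 =
      (((PySem.Str.split? (PySem.Str.upper (PySem.Str.replace
        (PySem.Str.replace (PySem.Str.replace raw1 " and " "-") "/" "-") " " "")) "-").getD
          []).filter (fun tok => tok != "")).foldl pvStep [] := rfl
  rw [hdef, mem_normfold]
  simp only [List.not_mem_nil, false_or, List.mem_filter, bne_iff_ne, ne_eq]
  constructor
  · rintro ⟨t, ⟨ht, _⟩, hg⟩; exact ⟨t, ht, hg⟩
  · rintro ⟨t, ht, hg⟩
    refine ⟨t, ⟨ht, ?_⟩, hg⟩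
    rintro rfl
    rw [(by decide : pvBaseNormalization.get? "" = none)] at hg
    cases hg

lemma tokenize_mem_base (raw1 : String) :
    ∀ t ∈ pvTokenizeRawPosition raw1, t ∈ pvBaseOrder := by
  intro t ht
  rcases (mem_tokenize_iff raw1 t).mp ht with ⟨tok, _, hg⟩
  exact (norm_value_mem tok t hg).1

-- A's "index dict + dedup + sort" equals filtering the fixed priority order
lemma sorted_eq_filter (tokens : List String)
    (hsub : ∀ t ∈ tokens, t ∈ pvBaseOrder) :
    PySem.List.sorted (PySem.Set.ofList tokens)
      (fun code =>
        (((PySem.List.enumerate pvBaseOrder).foldl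
            (fun d p => d.insert p.2 p.1) PySem.Dict.empty).getD code 99 : Int))
      = pvBaseOrder.filter
          (fun code => PySem.Set.contains (PySem.Set.ofList tokens) code) := by
  set u := PySem.Set.ofList tokens with hu
  have hun : u.Nodup := PySem.Set.nodup_ofList tokens
  have husub : ∀ x ∈ u, x ∈ pvBaseOrder := fun x hx =>
    hsub x ((PySem.Set.mem_ofList tokens x).mp hx)
  apply PySem.List.sorted_eq_of_perm_of_pairwise_lt
  · apply List.perm_of_nodup_nodup_toFinset_eq
    · exact List.Sublist.nodup List.filter_sublist (by decide : pvBaseOrder.Nodup)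
    · exact hun
    · ext x
      simp only [List.mem_toFinset, List.mem_filter, PySem.Set.contains_iff]
      exact ⟨fun ⟨_, h2⟩ => h2, fun h => ⟨husub x h, h⟩⟩
  · exact List.Pairwise.filter _ (by decide)

-- zip-with-lowercase form of a filter-then-lower
lemma zip_filter_map (q : String × String → Bool) (p : String → Bool)
    (hq : ∀ x, q x = p x.1) (l : List String) (f : String → String) :
    (((l.zip (l.map f)).filter q).map (fun x => x.2)) = (l.filter p).map f := by
  induction l with
  | nil => rfl
  | cons x xs ih =>
    simp only [List.map_cons, List.zip_cons_cons, List.filter_cons, hq]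
    by_cases hp : p x <;> simp [hp, ih]

lemma code_tags_eq : pvCodeTags = pvBaseOrder.zip (pvBaseOrder.map PySem.Str.lower) := by
  decide

-- B's tags list equals A's lowered filtered priority order
lemma tags_eq (raw1 : String) :
    (pvCodeTags.filter (fun ct =>
        (((PySem.Str.split? (PySem.Str.upper (PySem.Str.replace
          (PySem.Str.replace (PySem.Str.replace raw1 " and " "-") "/" "-") " " "")) "-").getD
            []).any (fun t => pvBaseNormalization.get? t == some ct.1)))).map (fun ct => ct.2)
      = (pvBaseOrder.filter (fun code =>
          PySem.Set.contains (PySem.Set.ofList (pvTokenizeRawPosition raw1)) code)).map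
            PySem.Str.lower := by
  rw [code_tags_eq,
    zip_filter_map
      (fun ct => (((PySem.Str.split? (PySem.Str.upper (PySem.Str.replace
        (PySem.Str.replace (PySem.Str.replace raw1 " and " "-") "/" "-") " " "")) "-").getD
          []).any (fun t => pvBaseNormalization.get? t == some ct.1)))
      (fun c => (((PySem.Str.split? (PySem.Str.upper (PySem.Str.replace
        (PySem.Str.replace (PySem.Str.replace raw1 " and " "-") "/" "-") " " "")) "-").getD
          []).any (fun t => pvBaseNormalization.get? t == some c)))
      (fun x => rfl) pvBaseOrder PySem.Str.lower]
  refine congrArg _ (List.filter_congr fun c _ => ?_)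
  rw [Bool.eq_iff_iff, List.any_eq_true, PySem.Set.contains_iff, PySem.Set.mem_ofList,
    mem_tokenize_iff]
  simp

lemma filter_nil_iff (raw1 : String) :
    pvBaseOrder.filter (fun code =>
        PySem.Set.contains (PySem.Set.ofList (pvTokenizeRawPosition raw1)) code) = []
      ↔ pvTokenizeRawPosition raw1 = [] := by
  constructor
  · intro h
    by_contra hne
    rcases List.exists_mem_of_ne_nil _ hne with ⟨c, hc⟩
    have hco := tokenize_mem_base raw1 c hc
    have hct : PySem.Set.contains (PySem.Set.ofList (pvTokenizeRawPosition raw1)) c = true := by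
      rw [PySem.Set.contains_iff, PySem.Set.mem_ofList]; exact hc
    have : c ∈ pvBaseOrder.filter (fun code =>
        PySem.Set.contains (PySem.Set.ofList (pvTokenizeRawPosition raw1)) code) :=
      List.mem_filter.mpr ⟨hco, hct⟩
    rw [h] at this
    cases this
  · intro h; rw [h]; decide

theorem derive_position_tags_eq (raw : Option String) :
    derive_position_tags raw = derive_position_tags_alt raw := by
  rcases raw with _ | s
  · rfl
  · unfold derive_position_tags derive_position_tags_alt
    simp only
    split_ifs
    · rfl
    · rfl
    · rename_i h1 hN hT
      exfalso
      apply hT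
      have hN' : pvTokenizeRawPosition (PySem.Str.strip s) = [] := by simpa using hN
      simp only [tags_eq, beq_iff_eq, List.map_eq_nil_iff]
      exact (filter_nil_iff _).mpr hN'
    · rename_i h1 hN hT
      exfalso
      apply hN
      simp only [tags_eq, beq_iff_eq, List.map_eq_nil_iff] at hT
      simp [(filter_nil_iff _).mp hT]
    · rename_i h1 hN hT
      rw [tags_eq, sorted_eq_filter _ (tokenize_mem_base _)]

-- ===== VERDICT =====
theorem derive_position_tags_spec : Claim_equal_derive_position_tags := by
  intro raw _
  exact derive_position_tags_eq raw
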